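-- pv_equiv track=rewrite | github.com/dtetreau251/mastermind-game | game.py | check_correct_numbers
-- ===== SOURCE A (Python) =====
-- def check_correct_numbers(player_list, computer_list):
--     computer_list_copy = computer_list.copy()
--     correct_nums = 0
--     for i in range(0, len(player_list)):
--         if player_list[i] in computer_list_copy:
--             index_of_match = computer_list_copy.index(player_list[i])
--             computer_list_copy.pop(index_of_match)
--             correct_nums += 1
--     return correct_nums
-- ===== SOURCE B (Python) =====
-- def check_correct_numbers(player_list, computer_list):
--     ps = sorted(player_list)
--     cs = sorted(computer_list)
--     i = j = correct = 0
--     while i < len(ps) and j < len(cs):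
--         if ps[i] == cs[j]:
--             correct += 1
--             i += 1
--             j += 1
--         elif ps[i] < cs[j]:
--             i += 1
--         else:
--             j += 1
--     return correct
-- ===== Notes on version B (the rewrite author's own statement) =====
-- stated objective: faster
-- what changed: Replaces A's per-element membership scan, index lookup and pop on a shrinking copy with sorting both lists once and counting matches in a single two-pointer merge pass.
import Mathlib
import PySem

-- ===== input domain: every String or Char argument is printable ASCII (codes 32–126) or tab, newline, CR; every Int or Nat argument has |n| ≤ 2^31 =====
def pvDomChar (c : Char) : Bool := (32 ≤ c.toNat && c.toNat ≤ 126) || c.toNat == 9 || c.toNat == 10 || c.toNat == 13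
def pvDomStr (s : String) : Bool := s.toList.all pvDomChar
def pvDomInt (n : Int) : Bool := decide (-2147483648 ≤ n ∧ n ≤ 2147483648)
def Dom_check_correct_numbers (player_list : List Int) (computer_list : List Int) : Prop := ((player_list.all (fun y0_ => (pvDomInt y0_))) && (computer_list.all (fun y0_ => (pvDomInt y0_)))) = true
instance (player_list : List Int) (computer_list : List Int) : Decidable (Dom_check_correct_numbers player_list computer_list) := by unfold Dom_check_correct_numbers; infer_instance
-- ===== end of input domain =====

-- B replaces A's quadratic membership-scan-and-pop with sort + one two-pointer merge pass (faster).

-- ===== PORT A =====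
-- loop body of A: membership test, index lookup, pop at that index, increment
def pvStepA (st : List Int × Int) (x : Int) : List Int × Int :=
  if x ∈ st.1 then
    match PySem.List.index? st.1 x with
    | some k =>
      match PySem.List.pop? st.1 (k : Int) with
      | some (_, rest) => (rest, st.2 + 1)
      | none => st          -- unreachable (index? returned a valid index)
    | none => st            -- unreachable (x ∈ st.1)
  else st

def check_correct_numbers (player_list : List Int) (computer_list : List Int) : Int :=
  (player_list.foldl pvStepA (computer_list, 0)).2

-- ===== PORT B =====
-- the while-loop of Source B: two pointers over the two sorted lists
def pvMergeCount : List Int → List Int → Int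
  | [], _ => 0
  | _ :: _, [] => 0
  | a :: s, b :: t =>
    if a = b then pvMergeCount s t + 1
    else if a < b then pvMergeCount s (b :: t)
    else pvMergeCount (a :: s) t
termination_by s t => s.length + t.length

def check_correct_numbers_alt (player_list : List Int) (computer_list : List Int) : Int :=
  pvMergeCount (PySem.List.sorted player_list (fun x => x) false)
               (PySem.List.sorted computer_list (fun x => x) false)

-- ===== PRECONDITION & SPEC =====
def Spec_check_correct_numbers (player_list : List Int) (computer_list : List Int) (out : Int) : Prop := out = check_correct_numbers_alt player_list computer_list
instance (player_list : List Int) (computer_list : List Int) (out : Int) : Decidable (Spec_check_correct_numbers player_list computer_list out) := by unfold Spec_check_correct_numbers; infer_instance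

-- ===== CLAIM (what is proved, stated in full; the proofs are below) =====
def Claim_equal_check_correct_numbers : Prop := ∀ (player_list : List Int) (computer_list : List Int), Dom_check_correct_numbers player_list computer_list → Spec_check_correct_numbers player_list computer_list (check_correct_numbers player_list computer_list)

-- ===== LEMMAS AND PROOFS =====

-- removing the element at the index of its first occurrence
theorem pvEraseIdx_len (pre suf : List Int) (x : Int) :
    (pre ++ x :: suf).eraseIdx pre.length = pre ++ suf := by
  induction pre with
  | nil => simp
  | cons p ps ih => simp [ih]

-- A's loop computes the cardinality of the multiset intersection.
theorem pvFoldA_eq (p : List Int) : ∀ (c : List Int) (acc : Int),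
    (p.foldl pvStepA (c, acc)).2 = acc + (((p : Multiset Int) ∩ (c : Multiset Int)).card : Int) := by
  induction p with
  | nil => intro c acc; simp
  | cons x ps ih =>
    intro c acc
    by_cases hx : x ∈ c
    · -- the pop removes the first occurrence of x, i.e. c.erase x
      obtain ⟨k, hk⟩ := Option.isSome_iff_exists.mp ((PySem.List.index?_isSome_iff c x).mpr hx)
      obtain ⟨pre, suf, hc, hlen, hpre⟩ := (PySem.List.index?_eq_some_iff c x k).mp hk
      have hklt : k < c.length := by subst hc; simp [← hlen]
      have hpop := PySem.List.pop?_natCast c k hklt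
      have herase : c.eraseIdx k = c.erase x := by
        subst hc
        rw [← hlen, pvEraseIdx_len, List.erase_append_right _ (by simpa using hpre)]
        simp
      have hstep : pvStepA (c, acc) x = (c.erase x, acc + 1) := by
        simp only [pvStepA, if_pos hx, hk, hpop, herase]
      have hinter : ((x :: ps : List Int) : Multiset Int) ∩ (c : Multiset Int)
          = x ::ₘ ((ps : Multiset Int) ∩ ((c.erase x : List Int) : Multiset Int)) := by
        rw [← Multiset.cons_coe, Multiset.cons_inter_of_pos _ (by simpa using hx),
            Multiset.coe_erase]
      simp only [List.foldl_cons, hstep, ih, hinter, Multiset.card_cons]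
      push_cast; ring
    · have hstep : pvStepA (c, acc) x = (c, acc) := by simp [pvStepA, hx]
      have hinter : ((x :: ps : List Int) : Multiset Int) ∩ (c : Multiset Int)
          = (ps : Multiset Int) ∩ (c : Multiset Int) := by
        rw [← Multiset.cons_coe, Multiset.cons_inter_of_neg _ (by simpa using hx)]
      simp only [List.foldl_cons, hstep, ih, hinter]

-- B's merge pass computes the same cardinality on sorted inputs.
theorem pvMergeCount_eq : ∀ (s t : List Int), s.Pairwise (· ≤ ·) → t.Pairwise (· ≤ ·) →
    pvMergeCount s t = (((s : Multiset Int) ∩ (t : Multiset Int)).card : Int) := by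
  intro s t
  fun_induction pvMergeCount s t with
  | case1 t => intro _ _; simp
  | case2 a s => intro _ _; simp
  | case3 s b t ih =>
    intro hs ht
    have : ((b :: s : List Int) : Multiset Int) ∩ ((b :: t : List Int) : Multiset Int)
        = b ::ₘ ((s : Multiset Int) ∩ (t : Multiset Int)) := by
      rw [← Multiset.cons_coe, ← Multiset.cons_coe,
          Multiset.cons_inter_of_pos _ (by simp), Multiset.erase_cons_head]
    rw [ih (List.pairwise_cons.mp hs).2 (List.pairwise_cons.mp ht).2, this, Multiset.card_cons]
    push_cast; ring
  | case4 a s b t hab hlt ih =>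
    intro hs ht
    have hnot : a ∉ (b :: t) := by
      intro hmem
      rcases List.mem_cons.mp hmem with h | h
      · exact hab h
      · exact absurd (List.rel_of_pairwise_cons ht h) (by omega)
    have : ((a :: s : List Int) : Multiset Int) ∩ ((b :: t : List Int) : Multiset Int)
        = (s : Multiset Int) ∩ ((b :: t : List Int) : Multiset Int) := by
      rw [← Multiset.cons_coe, Multiset.cons_inter_of_neg _ (by simpa using hnot)]
    rw [ih (List.pairwise_cons.mp hs).2 ht, this]
  | case5 a s b t hab hnlt ih =>
    intro hs ht
    have hnot : b ∉ (a :: s) := by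
      intro hmem
      rcases List.mem_cons.mp hmem with h | h
      · exact hab h.symm
      · exact absurd (List.rel_of_pairwise_cons hs h) (by omega)
    have : ((a :: s : List Int) : Multiset Int) ∩ ((b :: t : List Int) : Multiset Int)
        = ((a :: s : List Int) : Multiset Int) ∩ ((t : List Int) : Multiset Int) := by
      rw [Multiset.inter_comm, ← Multiset.cons_coe,
          Multiset.cons_inter_of_neg _ (by simpa using hnot), Multiset.inter_comm]
    rw [ih hs (List.pairwise_cons.mp ht).2, this]

-- ===== VERDICT (by name: the statement is the Claim_ definition above) =====
theorem check_correct_numbers_spec : Claim_equal_check_correct_numbers := by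
  intro p c _
  unfold Spec_check_correct_numbers check_correct_numbers check_correct_numbers_alt
  rw [pvFoldA_eq,
      pvMergeCount_eq _ _ (PySem.List.sorted_pairwise p (fun x => x))
                          (PySem.List.sorted_pairwise c (fun x => x)),
      Multiset.coe_eq_coe.mpr (PySem.List.sorted_perm p (fun x => x) false),
      Multiset.coe_eq_coe.mpr (PySem.List.sorted_perm c (fun x => x) false)]
  ring
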